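-- pv_equiv track=rewrite | github.com/AmandaAAlcantara/TPMS | 433_RX.py | manchester_encode
-- ===== SOURCE A (Python) =====
-- def manchester_encode(data):
--     manchester_dict = {
--         '0': '01',
--         '1': '10'
--     }
--     binary_data = ''.join(format(int(byte, 16), '04b') for byte in data)
--     manchester_encoded = ''.join(manchester_dict[bit] for bit in binary_data)
--     return manchester_encoded
-- ===== SOURCE B (Python) =====
-- def manchester_encode(data):
--     # Manchester: each bit of the signal is emitted followed by its complement.
--     bits = ''.join(format(int(byte, 16), '04b') for byte in data)
--     flipped = bits.translate(str.maketrans('01', '10'))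
--     return ''.join(b + f for b, f in zip(bits, flipped))
-- ===== Notes on version B (the rewrite author's own statement) =====
-- stated objective: alternative
-- what changed: Replaces A's per-bit dict-lookup join pass by complementing the whole bit string once with str.translate and interleaving it with the original via zip (Manchester = each bit followed by its complement); Pre_ excludes only inputs where A raises (non-hex tokens: ValueError; negative values: KeyError on '-').
import Mathlib
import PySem

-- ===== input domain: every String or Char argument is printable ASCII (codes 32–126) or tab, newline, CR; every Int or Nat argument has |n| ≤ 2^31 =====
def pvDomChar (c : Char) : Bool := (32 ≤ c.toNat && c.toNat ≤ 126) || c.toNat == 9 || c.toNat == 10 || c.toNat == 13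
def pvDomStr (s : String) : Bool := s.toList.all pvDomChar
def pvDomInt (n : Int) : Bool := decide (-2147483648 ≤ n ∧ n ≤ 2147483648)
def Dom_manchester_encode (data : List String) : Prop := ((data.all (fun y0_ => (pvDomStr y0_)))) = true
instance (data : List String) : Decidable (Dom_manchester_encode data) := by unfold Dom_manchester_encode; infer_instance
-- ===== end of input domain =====

-- B replaces A's per-bit dict-lookup pass by complementing the whole bit string once and
-- interleaving it with the original (Manchester = each bit followed by its complement); alternative decomposition, same cost.

-- ===== PORT A =====
-- manchester_dict = {'0': '01', '1': '10'}  (values as List Char)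
def pvManchDict : PySem.Dict Char (List Char) :=
  PySem.Dict.ofList [('0', ['0', '1']), ('1', ['1', '0'])]

-- format(n, '04b'): binary digits (PySem.Int.toBinChars = format(n,'b')) zero-padded on the left to
-- width 4 (exact for n ≥ 0, the only case inside Pre_; both Pythons call it with the same arguments)
def pvFormat04b (n : Int) : List Char :=
  let s := PySem.Int.toBinChars n
  List.replicate (4 - s.length) '0' ++ s

def manchester_encode (data : List String) : String :=
  -- binary_data = ''.join(format(int(byte, 16), '04b') for byte in data); int(byte,16) = PySem.Int.ofStrBase?,
  -- none (ValueError) is excluded by Pre_, so the getD default is never read inside Pre_.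
  let binary_data : List Char :=
    data.foldl (fun acc b => acc ++ pvFormat04b ((PySem.Int.ofStrBase? b 16).getD 0)) []
  -- ''.join(manchester_dict[bit] for bit in binary_data); KeyError ([] default) unreachable inside Pre_.
  String.ofList (binary_data.foldl (fun acc bit => acc ++ (pvManchDict.getD bit [])) [])

-- ===== PORT B =====
-- str.maketrans('01', '10'): '0' ↦ '1', '1' ↦ '0', every other character unchanged
def pvFlip (c : Char) : Char := if c = '0' then '1' else if c = '1' then '0' else c

def manchester_encode_alt (data : List String) : String :=
  -- bits = ''.join(format(int(byte, 16), '04b') for byte in data)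
  let bits : List Char :=
    (data.map (fun byte => pvFormat04b ((PySem.Int.ofStrBase? byte 16).getD 0))).flatten
  -- flipped = bits.translate(str.maketrans('01', '10'))
  let flipped : List Char := bits.map pvFlip
  -- ''.join(b + f for b, f in zip(bits, flipped))
  String.ofList (((bits.zip flipped).map (fun p => [p.1, p.2])).flatten)

-- ===== PRECONDITION & SPEC =====
-- A raises ValueError when some element is not a valid base-16 int literal, and KeyError (sign char '-'
-- not in the dict) when some element parses to a negative value; Pre_ excludes exactly those inputs.
def Pre_manchester_encode (data : List String) : Prop :=
  (data.all (fun b => match PySem.Int.ofStrBase? b 16 with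
    | some n => decide (0 ≤ n)
    | none => false)) = true
instance (data : List String) : Decidable (Pre_manchester_encode data) := by
  unfold Pre_manchester_encode; infer_instance

def pvWitness_manchester_encode : List String := ["ff", "0", "1A"]

def Spec_manchester_encode (data : List String) (out : String) : Prop := out = manchester_encode_alt data
instance (data : List String) (out : String) : Decidable (Spec_manchester_encode data out) := by unfold Spec_manchester_encode; infer_instance

-- ===== CLAIM (what is proved, stated in full; the proofs are below) =====
def Claim_equal_manchester_encode : Prop := ∀ (data : List String), Dom_manchester_encode data → Pre_manchester_encode data → Spec_manchester_encode data (manchester_encode data)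

-- ===== LEMMAS AND PROOFS =====

-- binary digits of m, MSB first (proof-side model of Nat.toDigits 2)
def pvBinNat (m : Nat) : List Char :=
  if _ : m < 2 then [Nat.digitChar m]
  else pvBinNat (m / 2) ++ [Nat.digitChar (m % 2)]
decreasing_by exact Nat.div_lt_self (by omega) (by omega)

theorem pvBinNat_lt {m : Nat} (h : m < 2) : pvBinNat m = [Nat.digitChar m] := by
  rw [pvBinNat, dif_pos h]

theorem pvBinNat_ge {m : Nat} (h : ¬ m < 2) :
    pvBinNat m = pvBinNat (m / 2) ++ [Nat.digitChar (m % 2)] := by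
  rw [pvBinNat, dif_neg h]

theorem pvToDigitsCore_eq (f : Nat) : ∀ (m : Nat) (acc : List Char), m < f →
    Nat.toDigitsCore 2 f m acc = pvBinNat m ++ acc := by
  induction f with
  | zero => intro m acc h; omega
  | succ f ih =>
    intro m acc h
    rw [Nat.toDigitsCore]
    by_cases h2 : m / 2 = 0
    · have hm : m < 2 := by omega
      rw [if_pos h2, pvBinNat_lt hm]
      have : m % 2 = m := Nat.mod_eq_of_lt hm
      simp [this]
    · have hm : ¬ m < 2 := by omega
      rw [if_neg h2, ih (m / 2) _ (by omega), pvBinNat_ge hm]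
      simp

theorem pvToDigits_eq (m : Nat) : Nat.toDigits 2 m = pvBinNat m := by
  rw [Nat.toDigits, pvToDigitsCore_eq (m + 1) m [] (by omega)]
  simp

theorem pvBinNat_digits (m : Nat) : ∀ c ∈ pvBinNat m, c = '0' ∨ c = '1' := by
  induction m using Nat.strong_induction_on with
  | _ m ih =>
    intro c hc
    by_cases h : m < 2
    · rw [pvBinNat_lt h] at hc
      interval_cases m <;> simp_all [Nat.digitChar]
    · rw [pvBinNat_ge h] at hc
      rcases List.mem_append.mp hc with hc | hc
      · exact ih (m / 2) (Nat.div_lt_self (by omega) (by omega)) c hc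
      · have : c = Nat.digitChar (m % 2) := by simpa using hc
        subst this
        rcases Nat.mod_two_eq_zero_or_one m with h2 | h2 <;> simp [h2, Nat.digitChar]

-- every character of A's and B's shared chunk is a binary digit (n ≥ 0 inside Pre_)
theorem pvChunk_digits (n : Int) (h0 : 0 ≤ n) : ∀ c ∈ pvFormat04b n, c = '0' ∨ c = '1' := by
  intro c hc
  have hbin : PySem.Int.toBinChars n = pvBinNat n.toNat := by
    rw [PySem.Int.toBinChars, if_neg (by omega)]
    simpa using pvToDigits_eq n.toNat
  rw [pvFormat04b] at hc
  simp only [hbin] at hc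
  rcases List.mem_append.mp hc with hc | hc
  · left; exact List.eq_of_mem_replicate hc
  · exact pvBinNat_digits n.toNat c hc

-- per-character key lemma: the dict pair for a binary digit c is c followed by its complement
theorem pvDict_pair (c : Char) (h : c = '0' ∨ c = '1') :
    pvManchDict.getD c [] = [c, pvFlip c] := by
  rcases h with h | h <;> subst h <;> decide

-- ===== VERDICT (by name: the statement is the Claim_ definition above) =====
theorem manchester_encode_spec : Claim_equal_manchester_encode := by
  intro data hdom hpre
  show manchester_encode data = manchester_encode_alt data
  simp only [manchester_encode, manchester_encode_alt,
    PySem.List.foldl_append_eq_flatMap, List.nil_append, ← List.flatMap_def]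
  congr 1
  -- B's zip of bits with its pvFlip image is the per-character pair map
  rw [show ∀ (l : List Char), l.zip (l.map pvFlip) = l.map (fun a => (a, pvFlip a)) from
      fun l => by simpa using List.zip_map' (f := (id : Char → Char)) (g := pvFlip) (l := l)]
  simp only [List.flatMap_map]
  set bits : List Char :=
    data.flatMap (fun b => pvFormat04b ((PySem.Int.ofStrBase? b 16).getD 0)) with hbits
  apply List.flatMap_congr
  intro c hc
  have hdig : c = '0' ∨ c = '1' := by
    rw [hbits, List.mem_flatMap] at hc
    obtain ⟨b, hb, hcb⟩ := hc
    unfold Pre_manchester_encode at hpre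
    have hb' := List.all_eq_true.mp hpre b hb
    revert hb' hcb
    cases hparse : PySem.Int.ofStrBase? b 16 with
    | none => simp
    | some n =>
      intro hcb hn
      simp only [decide_eq_true_eq] at hn
      exact pvChunk_digits n hn c (by simpa using hcb)
  simpa using pvDict_pair c hdig
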